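-- pv_equiv track=rewrite | github.com/AlexHackathon/GoldmanLab | Coding/Python Scripts/ECS 32B Homework/hw04.py | linearSearchValueIndexEqual
-- ===== SOURCE A (Python) =====
-- def linearSearchValueIndexEqual(plist,idx=0):
--     #An empty list never fits this description
--     if len(plist) == 0:
--         return []
--     if len(plist) == 1:
--         #A list of length 0 only agrees or doesn't agree with the criteria
--         #Base case ends the recursion when the last index is searched
--         if plist[0] == idx:
--             return [plist[0]]
--         else:
--             return []
--     else:
--         #Check if the first index of the passed list agrees with the passed index
--         if plist[0] == idx:
--             #Add the remaining recursive calls to this value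
--             #Increase the index since index 0 now represents idx+1 (1 on second iteration)
--             return [plist[0]]+linearSearchValueIndexEqual(plist[1:],idx+1)
--         else:
--             #Similar reductive call without adding because the first element didn't pass the test
--             return linearSearchValueIndexEqual(plist[1:], idx+1)
-- ===== SOURCE B (Python) =====
-- def linearSearchValueIndexEqual(plist, idx=0):
--     result = []
--     for i, v in enumerate(plist):
--         if v == i + idx:
--             result.append(v)
--     return result
-- ===== Notes on version B (the rewrite author's own statement) =====
-- stated objective: faster
-- what changed: Replaces the slice-based recursion (which copies the tail at each step) with one iterative pass over enumerate, maintaining an accumulator list and testing v == i + idx.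
import Mathlib
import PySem

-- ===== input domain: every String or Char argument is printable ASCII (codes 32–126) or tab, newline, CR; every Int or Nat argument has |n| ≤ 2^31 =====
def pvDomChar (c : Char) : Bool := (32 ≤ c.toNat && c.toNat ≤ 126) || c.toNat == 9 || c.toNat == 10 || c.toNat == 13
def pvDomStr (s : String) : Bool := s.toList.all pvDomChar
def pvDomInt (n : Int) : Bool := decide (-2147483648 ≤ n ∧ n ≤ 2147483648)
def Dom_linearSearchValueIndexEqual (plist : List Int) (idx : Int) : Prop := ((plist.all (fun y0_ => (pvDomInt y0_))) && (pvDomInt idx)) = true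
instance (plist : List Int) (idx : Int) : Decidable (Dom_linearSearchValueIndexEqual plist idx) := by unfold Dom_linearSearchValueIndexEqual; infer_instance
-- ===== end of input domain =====

-- B replaces the slice-based recursion with one iterative pass over enumerate (simpler decomposition).
-- ===== PORT A =====
def linearSearchValueIndexEqual (plist : List Int) (idx : Int) : List Int :=
  match plist with
  | [] => []
  | [x] => if x = idx then [x] else []
  | x :: rest => if x = idx then x :: linearSearchValueIndexEqual rest (idx + 1)
                 else linearSearchValueIndexEqual rest (idx + 1)

-- ===== PORT B =====
def linearSearchValueIndexEqual_alt (plist : List Int) (idx : Int) : List Int :=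
  (PySem.List.enumerate plist).foldl
    (fun result p => if p.2 = p.1 + idx then result ++ [p.2] else result) []

-- ===== PRECONDITION & SPEC =====
def Spec_linearSearchValueIndexEqual (plist : List Int) (idx : Int) (out : List Int) : Prop := out = linearSearchValueIndexEqual_alt plist idx
instance (plist : List Int) (idx : Int) (out : List Int) : Decidable (Spec_linearSearchValueIndexEqual plist idx out) := by unfold Spec_linearSearchValueIndexEqual; infer_instance

-- ===== CLAIM (what is proved, stated in full; the proofs are below) =====
def Claim_equal_linearSearchValueIndexEqual : Prop := ∀ (plist : List Int) (idx : Int), Dom_linearSearchValueIndexEqual plist idx → Spec_linearSearchValueIndexEqual plist idx (linearSearchValueIndexEqual plist idx)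

-- ===== LEMMAS AND PROOFS =====

-- ===== VERDICT (by name: the statement is the Claim_ definition above) =====
-- The loop of B, with the enumerate start and accumulator generalized, equals acc ++ (A's recursion).
theorem alt_loop_eq (plist : List Int) (idx s : Int) (acc : List Int) :
    (PySem.List.enumerate plist s).foldl
      (fun result p => if p.2 = p.1 + idx then result ++ [p.2] else result) acc
    = acc ++ linearSearchValueIndexEqual plist (s + idx) := by
  induction plist generalizing s acc with
  | nil => simp [PySem.List.enumerate_nil, linearSearchValueIndexEqual]
  | cons x rest ih =>
    rw [PySem.List.enumerate_cons, List.foldl_cons, ih]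
    cases rest with
    | nil =>
      by_cases h : x = s + idx <;>
        simp [linearSearchValueIndexEqual, h, PySem.List.enumerate_nil]
    | cons y t =>
      have e : s + 1 + idx = s + idx + 1 := by ring
      by_cases h : x = s + idx <;>
        simp [linearSearchValueIndexEqual, h, e]

-- ===== VERDICT (by name: the statement is the Claim_ definition above) =====
theorem linearSearchValueIndexEqual_spec : Claim_equal_linearSearchValueIndexEqual := by
  intro plist idx _
  unfold Spec_linearSearchValueIndexEqual linearSearchValueIndexEqual_alt
  have h := alt_loop_eq plist idx 0 []
  simpa [PySem.List.enumerate] using h.symm
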